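-- pv_equiv track=rewrite | github.com/andreykanava/Ai-Cup-2026 | data/drop_bad_features.py | build_drop_list
-- ===== SOURCE A (Python) =====
-- DROP_LIST_MANUAL = [
--     "acc_energy_vertical_p90",
--     "acc_energy_xy_p90",
--     "acc_energy_xy_std",
--     "alt_kurt",
--     "boost_glide_ratio",
--     "boost_heading_acf10",
--     "boost_speed_acf5",
--     "boost_vertical_oscillation_freq",
--     "climb_episode_count",
--     "climb_episode_mean_len",
--     "curv_kurt",
--     "curv_skew",
--     "descent_episode_max_len",
--     "descent_segments_count",
--     "duration_sec",
--     "energy_xy_max",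
--     "energy_xy_std",
--     "hd_large_turn_ratio",
--     "hd_turn_rate_cv",
--     "is_evening",
--     "is_night",
--     "jerk_energy_vertical_mean",
--     "jerk_energy_xy_std",
--     "jerk_rv_mean",
--     "jerk_rv_p90",
--     "max_speed",
--     "rv_acf1",
--     "rv_dom_freq",
--     "rv_spec_entropy",
--     "speed_burst_ratio_p90",
--     "speed_skew",
--     "speed_spec_entropy",
--     "speed_std",
--     "turn_kurt",
--     "turn_skew",
--     "vertical_burst_ratio_p90",
--     "z_range",
-- ]
--
-- def build_drop_list(columns):
--
--     auto_drop = []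
--
--     for col in columns:
--
--         if col.startswith("boost_"):
--             auto_drop.append(col)
--
--         elif col.startswith("jerk_"):
--             auto_drop.append(col)
--
--         elif col.endswith("_kurt"):
--             auto_drop.append(col)
--
--         elif col.endswith("_skew"):
--             auto_drop.append(col)
--
--         elif col.endswith("_spec_entropy"):
--             auto_drop.append(col)
--
--     full_drop = set(auto_drop) | set(DROP_LIST_MANUAL)
--
--     full_drop = [c for c in full_drop if c in columns]
--
--     return sorted(full_drop)
-- ===== SOURCE B (Python) =====
-- DROP_LIST_MANUAL = [
--     "acc_energy_vertical_p90",
--     "acc_energy_xy_p90",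
--     "acc_energy_xy_std",
--     "alt_kurt",
--     "boost_glide_ratio",
--     "boost_heading_acf10",
--     "boost_speed_acf5",
--     "boost_vertical_oscillation_freq",
--     "climb_episode_count",
--     "climb_episode_mean_len",
--     "curv_kurt",
--     "curv_skew",
--     "descent_episode_max_len",
--     "descent_segments_count",
--     "duration_sec",
--     "energy_xy_max",
--     "energy_xy_std",
--     "hd_large_turn_ratio",
--     "hd_turn_rate_cv",
--     "is_evening",
--     "is_night",
--     "jerk_energy_vertical_mean",
--     "jerk_energy_xy_std",
--     "jerk_rv_mean",
--     "jerk_rv_p90",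
--     "max_speed",
--     "rv_acf1",
--     "rv_dom_freq",
--     "rv_spec_entropy",
--     "speed_burst_ratio_p90",
--     "speed_skew",
--     "speed_spec_entropy",
--     "speed_std",
--     "turn_kurt",
--     "turn_skew",
--     "vertical_burst_ratio_p90",
--     "z_range",
-- ]
--
-- _MANUAL = set(DROP_LIST_MANUAL)
--
--
-- def _should_drop(col):
--     return (col in _MANUAL
--             or col.startswith(("boost_", "jerk_"))
--             or col.endswith(("_kurt", "_skew", "_spec_entropy")))
--
--
-- def build_drop_list(columns):
--     return sorted({col for col in columns if _should_drop(col)})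
-- ===== Notes on version B (the rewrite author's own statement) =====
-- stated objective: simpler
-- what changed: Replaces A's three-stage pipeline (build auto_drop list with an elif chain, union with the manual set, re-filter the union by an O(n) 'c in columns' list scan) with a single predicate-driven set comprehension over columns, dropping the intermediate auto_drop list and the per-element membership scan.
import Mathlib
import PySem

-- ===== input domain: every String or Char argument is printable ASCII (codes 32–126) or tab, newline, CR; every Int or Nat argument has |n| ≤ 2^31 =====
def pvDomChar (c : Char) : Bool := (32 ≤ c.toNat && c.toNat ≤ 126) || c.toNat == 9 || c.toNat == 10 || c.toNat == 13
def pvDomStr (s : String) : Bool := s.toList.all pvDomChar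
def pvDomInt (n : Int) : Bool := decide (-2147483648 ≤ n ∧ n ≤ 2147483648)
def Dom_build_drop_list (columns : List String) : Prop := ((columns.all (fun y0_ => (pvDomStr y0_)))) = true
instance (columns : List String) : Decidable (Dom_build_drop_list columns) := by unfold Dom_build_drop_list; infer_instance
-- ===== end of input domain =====

-- B is a simpler decomposition: one predicate-driven set comprehension over columns instead of
-- A's build-list / set-union / membership-refilter pipeline; return values are proved equal.

-- module constant (shared by both Pythons)
def DROP_LIST_MANUAL : List String := [
  "acc_energy_vertical_p90", "acc_energy_xy_p90", "acc_energy_xy_std", "alt_kurt",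
  "boost_glide_ratio", "boost_heading_acf10", "boost_speed_acf5",
  "boost_vertical_oscillation_freq", "climb_episode_count", "climb_episode_mean_len",
  "curv_kurt", "curv_skew", "descent_episode_max_len", "descent_segments_count",
  "duration_sec", "energy_xy_max", "energy_xy_std", "hd_large_turn_ratio",
  "hd_turn_rate_cv", "is_evening", "is_night", "jerk_energy_vertical_mean",
  "jerk_energy_xy_std", "jerk_rv_mean", "jerk_rv_p90", "max_speed", "rv_acf1",
  "rv_dom_freq", "rv_spec_entropy", "speed_burst_ratio_p90", "speed_skew",
  "speed_spec_entropy", "speed_std", "turn_kurt", "turn_skew",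
  "vertical_burst_ratio_p90", "z_range"]

-- ===== PORT A =====
def build_drop_list (columns : List String) : List String :=
  let auto_drop : List String := columns.foldl (fun auto_drop col =>
    if PySem.Str.startswith col "boost_" then auto_drop ++ [col]
    else if PySem.Str.startswith col "jerk_" then auto_drop ++ [col]
    else if PySem.Str.endswith col "_kurt" then auto_drop ++ [col]
    else if PySem.Str.endswith col "_skew" then auto_drop ++ [col]
    else if PySem.Str.endswith col "_spec_entropy" then auto_drop ++ [col]
    else auto_drop) []
  let full_drop : PySem.Set String := PySem.Set.union (PySem.Set.ofList auto_drop) DROP_LIST_MANUAL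
  let full_drop2 : List String := full_drop.filter (fun c => columns.contains c)
  PySem.List.sorted full_drop2 (fun x => x) false

-- ===== PORT B =====
def pvManualSet : PySem.Set String := PySem.Set.ofList DROP_LIST_MANUAL

def pvShouldDrop (col : String) : Bool :=
  PySem.Set.contains pvManualSet col
  || (PySem.Str.startswith col "boost_" || PySem.Str.startswith col "jerk_")
  || (PySem.Str.endswith col "_kurt" || PySem.Str.endswith col "_skew"
      || PySem.Str.endswith col "_spec_entropy")

def build_drop_list_alt (columns : List String) : List String :=
  PySem.List.sorted (PySem.Set.ofList (columns.filter pvShouldDrop)) (fun x => x) false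

-- ===== PRECONDITION & SPEC =====
def Spec_build_drop_list (columns : List String) (out : List String) : Prop := out = build_drop_list_alt columns
instance (columns : List String) (out : List String) : Decidable (Spec_build_drop_list columns out) := by unfold Spec_build_drop_list; infer_instance

-- ===== CLAIM (what is proved, stated in full; the proofs are below) =====
def Claim_equal_build_drop_list : Prop := ∀ (columns : List String), Dom_build_drop_list columns → Spec_build_drop_list columns (build_drop_list columns)

-- ===== LEMMAS AND PROOFS =====

-- A's elif chain as a single predicate
def pvPredA (col : String) : Bool :=
  PySem.Str.startswith col "boost_" || PySem.Str.startswith col "jerk_"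
  || PySem.Str.endswith col "_kurt" || PySem.Str.endswith col "_skew"
  || PySem.Str.endswith col "_spec_entropy"

lemma pvAuto_eq (columns : List String) :
    columns.foldl (fun auto_drop col =>
      if PySem.Str.startswith col "boost_" then auto_drop ++ [col]
      else if PySem.Str.startswith col "jerk_" then auto_drop ++ [col]
      else if PySem.Str.endswith col "_kurt" then auto_drop ++ [col]
      else if PySem.Str.endswith col "_skew" then auto_drop ++ [col]
      else if PySem.Str.endswith col "_spec_entropy" then auto_drop ++ [col]
      else auto_drop) []
    = columns.filter pvPredA := by
  have hc : columns.foldl (fun auto_drop col =>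
      if PySem.Str.startswith col "boost_" then auto_drop ++ [col]
      else if PySem.Str.startswith col "jerk_" then auto_drop ++ [col]
      else if PySem.Str.endswith col "_kurt" then auto_drop ++ [col]
      else if PySem.Str.endswith col "_skew" then auto_drop ++ [col]
      else if PySem.Str.endswith col "_spec_entropy" then auto_drop ++ [col]
      else auto_drop) []
      = columns.foldl (fun acc x => if pvPredA x then acc ++ [x] else acc) [] := by
    apply PySem.List.foldl_congr_mem
    intro acc col _
    simp only [pvPredA]
    by_cases h1 : PySem.Str.startswith col "boost_" <;>
    by_cases h2 : PySem.Str.startswith col "jerk_" <;>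
    by_cases h3 : PySem.Str.endswith col "_kurt" <;>
    by_cases h4 : PySem.Str.endswith col "_skew" <;>
    by_cases h5 : PySem.Str.endswith col "_spec_entropy" <;>
    (simp only [h1, h2, h3, h4, h5]; simp)
  rw [hc, PySem.List.foldl_append_if_eq_filter, List.nil_append]

set_option maxRecDepth 4096 in
lemma pvShouldDrop_iff (col : String) :
    pvShouldDrop col = true ↔ (pvPredA col = true ∨ col ∈ DROP_LIST_MANUAL) := by
  have hm : PySem.Set.contains pvManualSet col = true ↔ col ∈ DROP_LIST_MANUAL := by
    rw [PySem.Set.contains_iff]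
    unfold pvManualSet
    exact PySem.Set.mem_ofList DROP_LIST_MANUAL col
  simp only [pvShouldDrop, pvPredA, Bool.or_eq_true]
  rw [hm]
  tauto

lemma pvMem_A_iff (columns : List String) (x : String) :
    x ∈ (PySem.Set.union (PySem.Set.ofList (columns.filter pvPredA)) DROP_LIST_MANUAL).filter
          (fun c => columns.contains c)
    ↔ x ∈ PySem.Set.ofList (columns.filter pvShouldDrop) := by
  simp only [List.mem_filter, PySem.Set.mem_union, PySem.Set.mem_ofList,
    List.mem_filter, pvShouldDrop_iff, List.contains_iff_mem]
  constructor
  · rintro ⟨h1, h2⟩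
    refine ⟨h2, ?_⟩
    rcases h1 with ⟨_, hp⟩ | hm
    · exact Or.inl hp
    · exact Or.inr hm
  · rintro ⟨hc, hp | hm⟩
    · exact ⟨Or.inl ⟨hc, hp⟩, hc⟩
    · exact ⟨Or.inr hm, hc⟩

-- ===== VERDICT (by name: the statement is the Claim_ definition above) =====
theorem build_drop_list_spec : Claim_equal_build_drop_list := by
  intro columns _
  unfold Spec_build_drop_list build_drop_list build_drop_list_alt
  rw [pvAuto_eq]
  apply PySem.List.sorted_eq_sorted_of_perm _ _ _ (fun a b h => h)
  have hnA : ((PySem.Set.union (PySem.Set.ofList (columns.filter pvPredA)) DROP_LIST_MANUAL).filter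
      (fun c => columns.contains c)).Nodup :=
    List.Nodup.filter _ (PySem.Set.nodup_union _ _ (PySem.Set.nodup_ofList _))
  have hnB : (PySem.Set.ofList (columns.filter pvShouldDrop)).Nodup :=
    PySem.Set.nodup_ofList _
  rw [List.perm_ext_iff_of_nodup hnA hnB]
  exact pvMem_A_iff columns
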